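-- pv_equiv track=rewrite | github.com/andreiilie1/RobustCheck | robustcheck/EpsilonGreedyUntargeted/utils.py | get_grid_pixel_groups
-- ===== SOURCE A (Python) =====
-- import math
--
-- def get_grid_pixel_groups(patch_size, image_size):
--     """
--     Generates a grid of rectangles of size patch_size to cover an image of size image_size with no padding.
--
--     Args:
--         patch_size: A tuple of two integers representing the size of the rectangle that will be used to patch the image
--             and generate a rectangular grid
--         image_size: A tuple of two integers representing the size of the image to be patched.
--
--     Returns:
--         A list of lists of integer pairs, each list of integer pairs representing pixel indices belonging to the same
--             rectangular patch.
--     """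
--     pixel_groups = []
--     for i in range(math.ceil(image_size[0] / patch_size[0])):
--         for j in range(math.ceil(image_size[1] / patch_size[1])):
--             current_group = []
--             for pixel_i_delta in range(patch_size[0]):
--                 for pixel_j_delta in range(patch_size[1]):
--                     pixel_i = patch_size[0] * i + pixel_i_delta
--                     pixel_j = patch_size[1] * j + pixel_j_delta
--                     if pixel_i < image_size[0] and pixel_j < image_size[1]:
--                         current_group.append((pixel_i, pixel_j))
--             pixel_groups.append(current_group)
--
--     return pixel_groups
-- ===== SOURCE B (Python) =====
-- import math
--
--
-- def get_grid_pixel_groups(patch_size, image_size):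
--     """Single row-major pass over all in-bounds pixels, bucketed by patch index."""
--     num_i = math.ceil(image_size[0] / patch_size[0])
--     num_j = math.ceil(image_size[1] / patch_size[1])
--     if num_i <= 0 or num_j <= 0:
--         return []
--     buckets = [[] for _ in range(num_i * num_j)]
--     for pixel_i in range(image_size[0]):
--         for pixel_j in range(image_size[1]):
--             bucket = (pixel_i // patch_size[0]) * num_j + pixel_j // patch_size[1]
--             buckets[bucket].append((pixel_i, pixel_j))
--     return buckets
-- ===== Notes on version B (the rewrite author's own statement) =====
-- stated objective: alternative
-- what changed: Instead of looping over grid cells and, per cell, over all patch-delta offsets with an in-bounds filter, B preallocates the grid buckets and makes one row-major pass over only the in-bounds pixels, dropping each pixel into its bucket computed by floor division.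
-- outside the precondition, e.g. on get_grid_pixel_groups((1, 0), (0, 5)): A returns [], B raises ZeroDivisionError
import Mathlib
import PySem

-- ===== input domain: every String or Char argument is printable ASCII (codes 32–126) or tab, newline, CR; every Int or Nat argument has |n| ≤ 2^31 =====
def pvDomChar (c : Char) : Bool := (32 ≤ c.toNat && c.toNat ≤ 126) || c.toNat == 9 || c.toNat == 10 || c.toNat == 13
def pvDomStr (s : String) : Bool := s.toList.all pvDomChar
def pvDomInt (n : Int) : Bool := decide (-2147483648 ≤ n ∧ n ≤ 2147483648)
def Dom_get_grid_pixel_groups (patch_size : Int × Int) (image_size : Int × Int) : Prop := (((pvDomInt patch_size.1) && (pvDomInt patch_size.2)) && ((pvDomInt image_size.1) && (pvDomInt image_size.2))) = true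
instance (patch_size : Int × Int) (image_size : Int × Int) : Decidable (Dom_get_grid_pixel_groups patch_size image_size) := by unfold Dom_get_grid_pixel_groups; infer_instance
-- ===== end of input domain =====

-- B replaces A's per-patch delta loops (with an in-bounds filter) by one row-major pass over
-- the in-bounds pixels that drops each pixel into its patch bucket; proved equal on Pre_.


-- ===== PORT A =====
-- math.ceil(a / b): Python computes this through float division, which is exact for the
-- |a|,|b| ≤ 2^31 of Dom_ (and b ≠ 0 from Pre_); ported as the exact integer ceiling -((-a) // b).
def pyCeilDiv (a b : Int) : Int := -(PySem.Int.floordiv (-a) b)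

def get_grid_pixel_groups (patch_size : Int × Int) (image_size : Int × Int) : List (List (Int × Int)) :=
  (PySem.List.pyRange 0 (pyCeilDiv image_size.1 patch_size.1) 1).foldl (fun pixel_groups i =>
    (PySem.List.pyRange 0 (pyCeilDiv image_size.2 patch_size.2) 1).foldl (fun pixel_groups j =>
      let current_group :=
        (PySem.List.pyRange 0 patch_size.1 1).foldl (fun current_group pixel_i_delta =>
          (PySem.List.pyRange 0 patch_size.2 1).foldl (fun current_group pixel_j_delta =>
            let pixel_i := patch_size.1 * i + pixel_i_delta
            let pixel_j := patch_size.2 * j + pixel_j_delta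
            if pixel_i < image_size.1 ∧ pixel_j < image_size.2 then
              current_group ++ [(pixel_i, pixel_j)]
            else current_group) current_group) []
      pixel_groups ++ [current_group]) pixel_groups) []

-- ===== PORT B =====
-- buckets[bucket].append(x): whenever the loop body runs, 0 ≤ bucket < len(buckets)
-- (proved below for every pixel of pvPix), so Python's in-range list indexing is List.set/getD at bucket.toNat.
def get_grid_pixel_groups_alt (patch_size : Int × Int) (image_size : Int × Int) : List (List (Int × Int)) :=
  let num_i := pyCeilDiv image_size.1 patch_size.1
  let num_j := pyCeilDiv image_size.2 patch_size.2
  if num_i ≤ 0 ∨ num_j ≤ 0 then []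
  else
    (PySem.List.pyRange 0 image_size.1 1).foldl (fun buckets pixel_i =>
      (PySem.List.pyRange 0 image_size.2 1).foldl (fun buckets pixel_j =>
        let bucket := (PySem.Int.floordiv pixel_i patch_size.1) * num_j
                        + PySem.Int.floordiv pixel_j patch_size.2
        buckets.set bucket.toNat (buckets.getD bucket.toNat [] ++ [(pixel_i, pixel_j)])) buckets)
      ((PySem.List.pyRange 0 (num_i * num_j) 1).map (fun _ => ([] : List (Int × Int))))

-- ===== PRECONDITION & SPEC =====
-- Pre_ excludes patch sizes with a zero component: there A raises ZeroDivisionError, except in the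
-- accidental corner where the second component is zero but the outer grid range is already empty,
-- so A never evaluates the inner divisor and returns [] (e.g. ((1, 0), (0, 5))) while B, which
-- computes both ceilings up front, still raises.
def Pre_get_grid_pixel_groups (patch_size : Int × Int) (image_size : Int × Int) : Prop :=
  patch_size.1 ≠ 0 ∧ patch_size.2 ≠ 0
instance (patch_size : Int × Int) (image_size : Int × Int) : Decidable (Pre_get_grid_pixel_groups patch_size image_size) := by unfold Pre_get_grid_pixel_groups; infer_instance

def pvWitness_get_grid_pixel_groups : (Int × Int) × (Int × Int) := ((2, 2), (3, 3))

def Spec_get_grid_pixel_groups (patch_size : Int × Int) (image_size : Int × Int) (out : List (List (Int × Int))) : Prop := out = get_grid_pixel_groups_alt patch_size image_size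
instance (patch_size : Int × Int) (image_size : Int × Int) (out : List (List (Int × Int))) : Decidable (Spec_get_grid_pixel_groups patch_size image_size out) := by unfold Spec_get_grid_pixel_groups; infer_instance

-- ===== CLAIM (what is proved, stated in full; the proofs are below) =====
def Claim_equal_get_grid_pixel_groups : Prop := ∀ (patch_size : Int × Int) (image_size : Int × Int), Dom_get_grid_pixel_groups patch_size image_size → Pre_get_grid_pixel_groups patch_size image_size → Spec_get_grid_pixel_groups patch_size image_size (get_grid_pixel_groups patch_size image_size)

-- ===== LEMMAS AND PROOFS =====

-- Proof-only abbreviations: the row-major list of in-bounds pixels, the bucket index of a pixel,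
-- one step of B's bucket fold, and A's group (i, j) after the foldl book lemmas.
def pvPix (m n : Int) : List (Int × Int) :=
  (PySem.List.pyRange 0 m 1).flatMap (fun a => (PySem.List.pyRange 0 n 1).map (fun b => (a, b)))

def pvIdx (p q nj : Int) (x : Int × Int) : Int :=
  (PySem.Int.floordiv x.1 p) * nj + PySem.Int.floordiv x.2 q

def pvStep (p q nj : Int) (buckets : List (List (Int × Int))) (x : Int × Int) : List (List (Int × Int)) :=
  buckets.set (pvIdx p q nj x).toNat (buckets.getD (pvIdx p q nj x).toNat [] ++ [x])

def pvGrp (p q m n i j : Int) : List (Int × Int) :=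
  (PySem.List.pyRange 0 p 1).flatMap (fun di =>
    ((PySem.List.pyRange 0 q 1).filter (fun dj => decide (p * i + di < m ∧ q * j + dj < n))).map
      (fun dj => (p * i + di, q * j + dj)))

-- the column slice a group keeps: pixels (a, b) with q*j ≤ b < q*j + q and b < n
def pvCol (q n j a : Int) : List (Int × Int) :=
  (PySem.List.pyRange (q * j) (min n (q * j + q)) 1).map (fun b => (a, b))

-- ceiling brackets, by the sign of the divisor
theorem pv_ceil_bracket_pos {b : Int} (hb : 0 < b) (a : Int) :
    (pyCeilDiv a b - 1) * b < a ∧ a ≤ pyCeilDiv a b * b :=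
  (PySem.Int.neg_floordiv_neg_eq_iff_of_pos hb).mp rfl

theorem pv_ceil_bracket_neg {b : Int} (hb : b < 0) (a : Int) :
    pyCeilDiv a b * b ≤ a ∧ a < (pyCeilDiv a b - 1) * b := by
  have h1 := PySem.Int.floordiv_mul_add_mod (-a) b
  have h2 := PySem.Int.mod_neg_bounds (-a) hb
  unfold pyCeilDiv
  constructor <;> nlinarith

-- range interval filter: keep the x with lo ≤ x < hi
theorem pv_filter_interval (a b lo hi : Int) :
    (PySem.List.pyRange a b 1).filter (fun x => decide (lo ≤ x ∧ x < hi))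
      = PySem.List.pyRange (max a lo) (min b hi) 1 := by
  by_cases hab : b ≤ a
  · rw [PySem.List.pyRange_one_eq_nil hab, PySem.List.pyRange_one_eq_nil (by omega)]
    rfl
  · push_neg at hab
    rw [PySem.List.pyRange_one_cons hab]
    have ih := pv_filter_interval (a + 1) b lo hi
    by_cases h1 : lo ≤ a ∧ a < hi
    · have : a < min b hi := by omega
      rw [List.filter_cons_of_pos (by simpa using h1), ih,
        show max a lo = a by omega, show max (a+1) lo = a + 1 by omega,
        PySem.List.pyRange_one_cons this]
    · rw [List.filter_cons_of_neg (by simpa using h1), ih]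
      by_cases h2 : a < lo
      · congr 1; omega
      · rw [PySem.List.pyRange_one_eq_nil (by omega), PySem.List.pyRange_one_eq_nil (by omega)]
termination_by (b - a).toNat
decreasing_by omega

theorem pv_filter_lt (a b hi : Int) :
    (PySem.List.pyRange a b 1).filter (fun x => decide (x < hi)) = PySem.List.pyRange a (min b hi) 1 := by
  rw [List.filter_congr (q := fun x => decide (a ≤ x ∧ x < hi)) (fun x hx => by
        rw [PySem.List.mem_pyRange_one] at hx; rw [decide_eq_decide]; omega),
    pv_filter_interval a b a hi]
  congr 1; omega

-- shifting a range
theorem pv_map_add_pyRange (c t : Int) :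
    (PySem.List.pyRange 0 t 1).map (fun x => c + x) = PySem.List.pyRange c (c + t) 1 := by
  simp [PySem.List.pyRange_one, List.map_map, Function.comp_def]

theorem pv_flatMap_shift (c t : Int) (f : Int → List (Int × Int)) :
    (PySem.List.pyRange 0 t 1).flatMap (fun x => f (c + x))
      = (PySem.List.pyRange c (c + t) 1).flatMap f := by
  rw [← pv_map_add_pyRange, List.flatMap_map]

theorem pv_mem_pix (m n : Int) (x : Int × Int) :
    x ∈ pvPix m n ↔ (0 ≤ x.1 ∧ x.1 < m) ∧ (0 ≤ x.2 ∧ x.2 < n) := by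
  obtain ⟨a, b⟩ := x
  simp [pvPix, PySem.List.mem_pyRange_one]

-- positional arithmetic of the mixed-radix bucket index
theorem pv_mixed_radix (nj x y i j : Int) (hy : 0 ≤ y ∧ y < nj) (hj : 0 ≤ j ∧ j < nj) :
    x * nj + y = i * nj + j ↔ x = i ∧ y = j := by
  constructor
  · intro h
    have hd : (x - i) * nj = j - y := by ring_nf; linarith
    have hx : x = i := by nlinarith [sq_nonneg (x - i)]
    constructor
    · exact hx
    · subst hx; omega
  · rintro ⟨rfl, rfl⟩; rfl

-- B's bucket fold, characterised pointwise
theorem pv_fold_get (p q nj : Int) (L : List (Int × Int)) (buckets : List (List (Int × Int)))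
    (h : ∀ x ∈ L, 0 ≤ pvIdx p q nj x ∧ (pvIdx p q nj x).toNat < buckets.length) (k : Nat) :
    (L.foldl (pvStep p q nj) buckets)[k]?
      = (buckets[k]?).map (· ++ L.filter (fun x => decide (pvIdx p q nj x = (k : Int)))) := by
  induction L generalizing buckets with
  | nil => simp
  | cons x L ih =>
    rw [List.foldl_cons]
    have hx := h x (List.mem_cons_self)
    rw [ih (pvStep p q nj buckets x) (fun y hy => by
      have := h y (List.mem_cons_of_mem _ hy)
      simpa [pvStep] using this)]
    by_cases hk : pvIdx p q nj x = (k : Int)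
    · have hkt : (pvIdx p q nj x).toNat = k := by omega
      rw [List.filter_cons_of_pos (by simpa using hk)]
      have hkl : k < buckets.length := hkt ▸ hx.2
      simp only [pvStep, hkt, List.getElem?_set]
      rw [List.getD_eq_getElem _ _ hkl]
      simp [hkl]
    · have hkt : (pvIdx p q nj x).toNat ≠ k := by omega
      rw [List.filter_cons_of_neg (by simpa using hk)]
      simp only [pvStep, List.getElem?_set, if_neg hkt]

-- A's closed form
theorem pv_A_closed (patch_size image_size : Int × Int) :
    get_grid_pixel_groups patch_size image_size
      = (PySem.List.pyRange 0 (pyCeilDiv image_size.1 patch_size.1) 1).flatMap (fun i =>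
          (PySem.List.pyRange 0 (pyCeilDiv image_size.2 patch_size.2) 1).map (fun j =>
            pvGrp patch_size.1 patch_size.2 image_size.1 image_size.2 i j)) := by
  unfold get_grid_pixel_groups pvGrp
  simp only [PySem.List.foldl_append_ite, PySem.List.foldl_append_eq_flatMap,
    List.nil_append, ← List.map_eq_flatMap]

-- B's nested fold is the bucket fold over the pixel list
theorem pv_B_fold (patch_size image_size : Int × Int)
    (hnot : ¬ (pyCeilDiv image_size.1 patch_size.1 ≤ 0 ∨ pyCeilDiv image_size.2 patch_size.2 ≤ 0)) :
    get_grid_pixel_groups_alt patch_size image_size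
      = (pvPix image_size.1 image_size.2).foldl
          (pvStep patch_size.1 patch_size.2 (pyCeilDiv image_size.2 patch_size.2))
          ((PySem.List.pyRange 0 (pyCeilDiv image_size.1 patch_size.1 * pyCeilDiv image_size.2 patch_size.2) 1).map
            (fun _ => ([] : List (Int × Int)))) := by
  unfold get_grid_pixel_groups_alt
  rw [if_neg hnot]
  rw [pvPix, List.foldl_flatMap]
  simp only [List.foldl_map, pvStep, pvIdx]

-- grid reindexing
theorem pv_reindex (ni nj : Int) (hnj : 0 ≤ nj) (f : Int → List (Int × Int)) :
    (PySem.List.pyRange 0 (ni * nj) 1).map f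
      = (PySem.List.pyRange 0 ni 1).flatMap (fun i =>
          (PySem.List.pyRange 0 nj 1).map (fun j => f (i * nj + j))) := by
  by_cases hni : ni ≤ 0
  · rw [PySem.List.pyRange_one_eq_nil (show ni * nj ≤ 0 by nlinarith),
      PySem.List.pyRange_one_eq_nil hni]
    rfl
  · push_neg at hni
    have ih := pv_reindex (ni - 1) nj hnj f
    have h1 : PySem.List.pyRange 0 ni 1 = PySem.List.pyRange 0 (ni - 1) 1 ++ [ni - 1] := by
      have := PySem.List.pyRange_one_succ_right (a := 0) (b := ni - 1) (by omega)
      simpa [show ni - 1 + 1 = ni by ring] using this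
    have h2 : PySem.List.pyRange 0 (ni * nj) 1
        = PySem.List.pyRange 0 ((ni - 1) * nj) 1 ++ PySem.List.pyRange ((ni - 1) * nj) (ni * nj) 1 :=
      PySem.List.pyRange_one_append _ _ _ (by nlinarith) (by nlinarith)
    rw [h1, h2, List.map_append, List.flatMap_append, ih]
    congr 1
    have h3 : PySem.List.pyRange ((ni - 1) * nj) (ni * nj) 1
        = (PySem.List.pyRange 0 nj 1).map (fun j => (ni - 1) * nj + j) := by
      rw [pv_map_add_pyRange]
      congr 1; ring
    rw [h3, List.map_map]
    simp [Function.comp_def]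
termination_by ni.toNat
decreasing_by omega

-- the per-cell equality: filtering the pixel list to one bucket is A's group for that cell
theorem pv_cell (p q m n ni nj i j : Int) (hp : p ≠ 0) (hq : q ≠ 0)
    (hni_eq : ni = pyCeilDiv m p) (hnj_eq : nj = pyCeilDiv n q)
    (hni : 0 < ni) (hnj : 0 < nj)
    (hi : 0 ≤ i ∧ i < ni) (hj : 0 ≤ j ∧ j < nj) :
    (pvPix m n).filter (fun x => decide (pvIdx p q nj x = i * nj + j)) = pvGrp p q m n i j := by
  rcases lt_or_gt_of_ne hp with hpneg | hppos
  · -- p < 0 forces m < 0: both sides are empty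
    have hbm := hni_eq ▸ pv_ceil_bracket_neg hpneg m
    have hm0 : m < 0 := by nlinarith
    rw [pvGrp, pvPix, PySem.List.pyRange_one_eq_nil (le_of_lt hm0),
      PySem.List.pyRange_one_eq_nil (show p ≤ 0 by omega)]
    rfl
  rcases lt_or_gt_of_ne hq with hqneg | hqpos
  · -- q < 0 forces n < 0: both sides are empty
    have hbn := hnj_eq ▸ pv_ceil_bracket_neg hqneg n
    have hn0 : n < 0 := by nlinarith
    rw [pvGrp, pvPix, PySem.List.pyRange_one_eq_nil (le_of_lt hn0),
      PySem.List.pyRange_one_eq_nil (show q ≤ 0 by omega)]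
    have e : ∀ (l : List Int), l.flatMap (fun _ => ([] : List (Int × Int))) = [] :=
      fun l => List.flatMap_eq_nil_iff.mpr (fun _ _ => rfl)
    simp [e]
  -- main case p > 0, q > 0 (hence m > 0, n > 0)
  have hbm := hni_eq ▸ pv_ceil_bracket_pos hppos m
  have hbn := hnj_eq ▸ pv_ceil_bracket_pos hqpos n
  have hm0 : 0 < m := by nlinarith
  have hn0 : 0 < n := by nlinarith
  have hpim : p * i < m := by nlinarith
  -- LHS → interval form
  rw [pvPix, List.filter_flatMap]
  have lhs_cell : ∀ a ∈ PySem.List.pyRange 0 m 1,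
      ((PySem.List.pyRange 0 n 1).map (fun b => (a, b))).filter
          (fun x => decide (pvIdx p q nj x = i * nj + j))
        = if PySem.Int.floordiv a p = i then pvCol q n j a else [] := by
    intro a ha
    rw [PySem.List.mem_pyRange_one] at ha
    rw [List.filter_map]
    have hcong : ∀ b ∈ PySem.List.pyRange 0 n 1,
        ((fun x => decide (pvIdx p q nj x = i * nj + j)) ∘ (fun b => (a, b))) b
          = (decide (PySem.Int.floordiv a p = i) && decide (q * j ≤ b ∧ b < q * j + q)) := by
      intro b hb
      rw [PySem.List.mem_pyRange_one] at hb
      have hfb0 : 0 ≤ PySem.Int.floordiv b q := by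
        rw [PySem.Int.le_floordiv_iff_mul_le hqpos]; omega
      have hfbnj : PySem.Int.floordiv b q < nj := by
        rw [PySem.Int.floordiv_lt_iff_lt_mul hqpos]; nlinarith
      simp only [Function.comp_apply, pvIdx]
      rw [← Bool.decide_and, decide_eq_decide]
      rw [pv_mixed_radix nj _ _ i j ⟨hfb0, hfbnj⟩ hj]
      have hcol : PySem.Int.floordiv b q = j ↔ (q * j ≤ b ∧ b < q * j + q) := by
        rw [PySem.Int.floordiv_eq_iff_of_pos hqpos]
        constructor <;> intro hh <;>
          exact ⟨by nlinarith [hh.1, hh.2], by nlinarith [hh.1, hh.2]⟩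
      rw [hcol]
    rw [List.filter_congr hcong]
    by_cases hfa : PySem.Int.floordiv a p = i
    · rw [if_pos hfa]
      simp only [hfa, decide_true, Bool.true_and]
      rw [pv_filter_interval, pvCol]
      congr 2
      have : 0 ≤ q * j := by nlinarith [hj.1]
      omega
    · rw [if_neg hfa]
      simp [hfa]
  rw [List.flatMap_congr lhs_cell]
  -- split the row range around [p*i, min m (p*i+p))
  have hsplit1 : PySem.List.pyRange 0 m 1
      = PySem.List.pyRange 0 (p * i) 1 ++ PySem.List.pyRange (p * i) m 1 :=
    PySem.List.pyRange_one_append _ _ _ (by nlinarith [hi.1]) (by omega)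
  have hsplit2 : PySem.List.pyRange (p * i) m 1
      = PySem.List.pyRange (p * i) (min m (p * i + p)) 1
          ++ PySem.List.pyRange (min m (p * i + p)) m 1 :=
    PySem.List.pyRange_one_append _ _ _ (by omega) (by omega)
  rw [hsplit1, hsplit2, List.flatMap_append, List.flatMap_append]
  have hchunk1 : (PySem.List.pyRange 0 (p * i) 1).flatMap
      (fun a => if PySem.Int.floordiv a p = i then pvCol q n j a else []) = [] := by
    rw [List.flatMap_eq_nil_iff]
    intro a ha
    rw [PySem.List.mem_pyRange_one] at ha
    have : PySem.Int.floordiv a p < i := by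
      rw [PySem.Int.floordiv_lt_iff_lt_mul hppos]; nlinarith
    rw [if_neg (by omega)]
  have hchunk3 : (PySem.List.pyRange (min m (p * i + p)) m 1).flatMap
      (fun a => if PySem.Int.floordiv a p = i then pvCol q n j a else []) = [] := by
    rw [List.flatMap_eq_nil_iff]
    intro a ha
    rw [PySem.List.mem_pyRange_one] at ha
    have hge : p * i + p ≤ a := by omega
    have : i + 1 ≤ PySem.Int.floordiv a p := by
      rw [PySem.Int.le_floordiv_iff_mul_le hppos]; nlinarith
    rw [if_neg (by omega)]
  rw [hchunk1, hchunk3, List.nil_append, List.append_nil]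
  have hchunk2 : (PySem.List.pyRange (p * i) (min m (p * i + p)) 1).flatMap
      (fun a => if PySem.Int.floordiv a p = i then pvCol q n j a else [])
      = (PySem.List.pyRange (p * i) (min m (p * i + p)) 1).flatMap (pvCol q n j) := by
    apply List.flatMap_congr
    intro a ha
    rw [PySem.List.mem_pyRange_one] at ha
    rw [if_pos (by
      rw [PySem.Int.floordiv_eq_iff_of_pos hppos]
      have h1 := min_le_right m (p * i + p)
      constructor <;> nlinarith [ha.1, ha.2])]
  rw [hchunk2]
  -- RHS → the same interval form
  rw [pvGrp]
  have rhs_cell : ∀ di ∈ PySem.List.pyRange 0 p 1,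
      ((PySem.List.pyRange 0 q 1).filter (fun dj => decide (p * i + di < m ∧ q * j + dj < n))).map
          (fun dj => (p * i + di, q * j + dj))
        = if p * i + di < m then pvCol q n j (p * i + di) else [] := by
    intro di hdi
    rw [PySem.List.mem_pyRange_one] at hdi
    by_cases hdm : p * i + di < m
    · rw [if_pos hdm]
      rw [List.filter_congr (q := fun dj => decide (dj < n - q * j)) (fun dj hdj => by
        rw [decide_eq_decide]; omega)]
      rw [pv_filter_lt]
      rw [show (fun dj => ((p * i + di : Int), q * j + dj))
            = ((fun b => ((p * i + di : Int), b)) ∘ (fun dj => q * j + dj)) from rfl]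
      rw [← List.map_map, pv_map_add_pyRange, pvCol]
      congr 2
      omega
    · rw [if_neg hdm]
      rw [List.filter_congr (q := fun _ => false) (fun dj hdj => by simp; omega)]
      simp
  rw [List.flatMap_congr rhs_cell,
    pv_flatMap_shift (p * i) p (fun a => if a < m then pvCol q n j a else [])]
  have hsplit2' : PySem.List.pyRange (p * i) (p * i + p) 1
      = PySem.List.pyRange (p * i) (min m (p * i + p)) 1
          ++ PySem.List.pyRange (min m (p * i + p)) (p * i + p) 1 :=
    PySem.List.pyRange_one_append _ _ _ (by omega) (by omega)
  rw [hsplit2', List.flatMap_append]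
  have hchunk2' : (PySem.List.pyRange (min m (p * i + p)) (p * i + p) 1).flatMap
      (fun a => if a < m then pvCol q n j a else []) = [] := by
    rw [List.flatMap_eq_nil_iff]
    intro a ha
    rw [PySem.List.mem_pyRange_one] at ha
    rw [if_neg (by omega)]
  have hchunk1' : (PySem.List.pyRange (p * i) (min m (p * i + p)) 1).flatMap
      (fun a => if a < m then pvCol q n j a else [])
      = (PySem.List.pyRange (p * i) (min m (p * i + p)) 1).flatMap (pvCol q n j) := by
    apply List.flatMap_congr
    intro a ha
    rw [PySem.List.mem_pyRange_one] at ha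
    rw [if_pos (by omega)]
  rw [hchunk2', hchunk1', List.append_nil]

-- ===== VERDICT (by name: the statement is the Claim_ definition above) =====
theorem get_grid_pixel_groups_spec : Claim_equal_get_grid_pixel_groups := by
  intro patch_size image_size _ hpre
  obtain ⟨hp, hq⟩ := hpre
  unfold Spec_get_grid_pixel_groups
  set p := patch_size.1 with hp_def
  set q := patch_size.2 with hq_def
  set m := image_size.1 with hm_def
  set n := image_size.2 with hn_def
  set ni := pyCeilDiv m p with hni_def
  set nj := pyCeilDiv n q with hnj_def
  by_cases hdeg : ni ≤ 0 ∨ nj ≤ 0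
  · -- degenerate grid: both return []
    rw [pv_A_closed]
    unfold get_grid_pixel_groups_alt
    rw [if_pos hdeg]
    rcases hdeg with h | h
    · rw [PySem.List.pyRange_one_eq_nil h]; rfl
    · rw [PySem.List.pyRange_one_eq_nil h]
      simp [List.flatMap_eq_nil_iff]
  · push_neg at hdeg
    obtain ⟨hni, hnj⟩ := hdeg
    -- pixel bucket indices are in range
    have hbounds : ∀ x ∈ pvPix m n, 0 ≤ pvIdx p q nj x ∧
        (pvIdx p q nj x).toNat < ((PySem.List.pyRange 0 (ni * nj) 1).map
          (fun _ => ([] : List (Int × Int)))).length := by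
      intro x hx
      have hx' := (pv_mem_pix m n x).mp hx
      have hppos : 0 < p := by
        rcases lt_or_gt_of_ne hp with hneg | hpos
        · have hbm := hni_def ▸ pv_ceil_bracket_neg hneg m
          nlinarith [hx'.1.1, hx'.1.2]
        · exact hpos
      have hqpos : 0 < q := by
        rcases lt_or_gt_of_ne hq with hneg | hpos
        · have hbn := hnj_def ▸ pv_ceil_bracket_neg hneg n
          nlinarith [hx'.2.1, hx'.2.2]
        · exact hpos
      have hbm := hni_def ▸ pv_ceil_bracket_pos hppos m
      have hbn := hnj_def ▸ pv_ceil_bracket_pos hqpos n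
      have h1 : 0 ≤ PySem.Int.floordiv x.1 p := by
        rw [PySem.Int.le_floordiv_iff_mul_le hppos]; omega
      have h2 : 0 ≤ PySem.Int.floordiv x.2 q := by
        rw [PySem.Int.le_floordiv_iff_mul_le hqpos]; omega
      have h3 : PySem.Int.floordiv x.1 p < ni := by
        rw [PySem.Int.floordiv_lt_iff_lt_mul hppos]; nlinarith [hx'.1.2]
      have h4 : PySem.Int.floordiv x.2 q < nj := by
        rw [PySem.Int.floordiv_lt_iff_lt_mul hqpos]; nlinarith [hx'.2.2]
      have hidx0 : 0 ≤ pvIdx p q nj x := by unfold pvIdx; nlinarith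
      have hidxN : pvIdx p q nj x < ni * nj := by unfold pvIdx; nlinarith
      refine ⟨hidx0, ?_⟩
      rw [List.length_map, PySem.List.length_pyRange_one]
      omega
    -- A's closed form, recast through the per-cell equality and the reindexing
    rw [pv_A_closed]
    have hcells : ∀ i ∈ PySem.List.pyRange 0 ni 1,
        (PySem.List.pyRange 0 nj 1).map (fun j => pvGrp p q m n i j)
          = (PySem.List.pyRange 0 nj 1).map (fun j =>
              (pvPix m n).filter (fun x => decide (pvIdx p q nj x = i * nj + j))) := by
      intro i hi
      rw [PySem.List.mem_pyRange_one] at hi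
      apply List.map_congr_left
      intro j hj
      rw [PySem.List.mem_pyRange_one] at hj
      exact (pv_cell p q m n ni nj i j hp hq hni_def hnj_def hni hnj hi hj).symm
    rw [List.flatMap_congr hcells,
      ← pv_reindex ni nj (le_of_lt hnj)
        (fun k => (pvPix m n).filter (fun x => decide (pvIdx p q nj x = k)))]
    -- B via the bucket fold
    rw [pv_B_fold patch_size image_size (by push_neg; exact ⟨hni, hnj⟩)]
    apply List.ext_getElem?
    intro k
    rw [pv_fold_get p q nj (pvPix m n) _ hbounds k, List.getElem?_map, List.getElem?_map]
    by_cases hk : k < (ni * nj).toNat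
    · rw [List.getElem?_eq_getElem (l := PySem.List.pyRange 0 (ni * nj) 1)
        (by simpa [PySem.List.length_pyRange_one] using hk)]
      simp [PySem.List.getElem_pyRange_one]
    · rw [List.getElem?_eq_none (l := PySem.List.pyRange 0 (ni * nj) 1)
        (by simpa [PySem.List.length_pyRange_one] using hk)]
      rfl
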